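-- pv_equiv track=rewrite | github.com/Toe-Knee-Y/LeetCode_HackerRank_Soln | leet_code/Amazon/task_1.py | solution
-- ===== SOURCE A (Python) =====
-- def solution(A):
--     # write your code in Python 3.6
--     # 1, 2, 2, 2, 5, 5, 5, 8
--     # 1: 1, 2: 3, 5: 3, 8
--     # 1: 4, 3: 2, 4: 5
--
--     # first we create a hashmap to calculate the number of times
--     # each element appear
--     hashmap = {}
--     for number in A:
--         if number not in hashmap:
--             hashmap[number] = 1
--         else:
--             hashmap[number] += 1
--
--     result = 0
--     for key in hashmap:
--         frequency = hashmap[key]  # number of times the element has appeared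
--         diff_with_0 = frequency - 0
--         diff_with_key = abs(frequency - key)
--         # we take the min diff thats either close to 0 or to the number
--         # meaning we are calculating if it takes longer to get to the number
--         # or to remove the number completely
--         diff = min(diff_with_0, diff_with_key)
--
--         result += diff
--
--     return result
-- ===== SOURCE B (Python) =====
-- def solution(A):
--     # Sort a copy and walk consecutive equal runs instead of building a hash map.
--     s = sorted(A)
--     n = len(s)
--     total = 0
--     i = 0
--     while i < n:
--         j = i
--         while j < n and s[j] == s[i]:
--             j += 1
--         c = j - i
--         total += min(c, abs(c - s[i]))
--         i = j
--     return total
-- ===== Notes on version B (the rewrite author's own statement) =====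
-- stated objective: alternative
-- what changed: Replaces the hash-map counting pass plus key iteration with a sort of a copy followed by a single run-length scan over adjacent equal elements, summing min(count, abs(count-value)) per run.
import Mathlib
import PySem

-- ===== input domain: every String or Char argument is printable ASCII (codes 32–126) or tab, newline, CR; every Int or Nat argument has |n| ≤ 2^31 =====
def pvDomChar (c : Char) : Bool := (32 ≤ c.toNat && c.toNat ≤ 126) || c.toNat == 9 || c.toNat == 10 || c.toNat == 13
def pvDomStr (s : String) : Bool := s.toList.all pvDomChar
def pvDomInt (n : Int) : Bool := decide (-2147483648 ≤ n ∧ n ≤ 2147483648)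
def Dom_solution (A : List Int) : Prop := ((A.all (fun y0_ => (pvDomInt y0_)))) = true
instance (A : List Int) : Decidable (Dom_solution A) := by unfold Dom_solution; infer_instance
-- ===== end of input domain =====

-- ===== PORT A =====
-- B replaces A's hash-map counting pass by sort + run-length scan; equal return value proved (A does not mutate its input).
def solution (A : List Int) : Int :=
  -- hashmap = {}; for number in A: ...
  let hashmap : PySem.Dict Int Int :=
    A.foldl (fun d number =>
      if d.contains number then d.insert number (d.getD number 0 + 1)
      else d.insert number 1) PySem.Dict.empty
  -- for key in hashmap: frequency = hashmap[key] (key comes from the dict, so the lookup succeeds; getD is exact here)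
  hashmap.keys.foldl (fun result key =>
    let frequency := hashmap.getD key 0
    let diff_with_0 := frequency - 0
    let diff_with_key := |frequency - key|
    let diff := min diff_with_0 diff_with_key
    result + diff) 0

-- ===== PORT B =====
-- the inner `while j < n and s[j] == s[i]` scan of one run: takeWhile measures it, dropWhile advances i to j
def runs (s : List Int) : List (Int × Int) :=
  match s with
  | [] => []
  | x :: xs =>
    (x, 1 + ((xs.takeWhile (fun y => y == x)).length : Int)) :: runs (xs.dropWhile (fun y => y == x))
termination_by s.length
decreasing_by
  have := List.length_dropWhile_le (fun y => y == x) xs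
  simp only [List.length_cons]; omega

def solution_alt (A : List Int) : Int :=
  let s := PySem.List.sorted A (fun x => x) false
  (runs s).foldl (fun total p => total + min p.2 |p.2 - p.1|) 0

-- ===== PRECONDITION & SPEC =====
def Spec_solution (A : List Int) (out : Int) : Prop := out = solution_alt A
instance (A : List Int) (out : Int) : Decidable (Spec_solution A out) := by unfold Spec_solution; infer_instance

-- ===== CLAIM (what is proved, stated in full; the proofs are below) =====
def Claim_equal_solution : Prop := ∀ (A : List Int), Dom_solution A → Spec_solution A (solution A)

-- ===== LEMMAS AND PROOFS =====

lemma not_mem_dropWhile_of_sorted (x : Int) :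
    ∀ xs : List Int, (∀ y ∈ xs, x ≤ y) → xs.Pairwise (· ≤ ·) →
      x ∉ xs.dropWhile (fun y => y == x) := by
  intro xs
  induction xs with
  | nil => simp
  | cons y ys ih =>
    intro hle hp
    by_cases h : y = x
    · subst h
      simp only [List.dropWhile_cons, beq_self_eq_true]
      exact ih (fun z hz => hle z (List.mem_cons_of_mem _ hz)) hp.of_cons
    · have hbe : (y == x) = false := by simp [h]
      simp only [List.dropWhile_cons, hbe]
      intro hmem
      have hxy : x ≤ y := hle y (List.mem_cons_self)
      have hxlt : x < y := lt_of_le_of_ne hxy (fun e => h e.symm)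
      rcases List.mem_cons.1 hmem with rfl | hmem'
      · exact absurd rfl h
      · have : y ≤ x := (List.pairwise_cons.1 hp).1 x hmem'
        omega

lemma runs_fst_mem : ∀ s : List Int, ∀ v, (v ∈ (runs s).map Prod.fst ↔ v ∈ s) := by
  intro s
  induction s using runs.induct with
  | case1 => simp [runs]
  | case2 x xs ih =>
    intro v
    rw [runs]
    simp only [List.map_cons, List.mem_cons, ih v]
    constructor
    · rintro (rfl | h)
      · exact Or.inl rfl
      · exact Or.inr (List.Sublist.mem h (List.dropWhile_sublist _))
    · rintro (rfl | h)
      · exact Or.inl rfl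
      · by_cases hvx : v = x
        · exact Or.inl hvx
        · right
          have hsplit := List.takeWhile_append_dropWhile (p := fun y => y == x) (l := xs)
          rw [← hsplit] at h
          rcases List.mem_append.1 h with h' | h'
          · exact absurd (by simpa using List.mem_takeWhile_imp h') hvx
          · exact h'

lemma sorted_tail_facts (x : Int) (xs : List Int) (hp : (x :: xs).Pairwise (· ≤ ·)) :
    (xs.dropWhile (fun y => y == x)).Pairwise (· ≤ ·) ∧ x ∉ xs.dropWhile (fun y => y == x) := by
  have h1 := (List.pairwise_cons.1 hp).1
  have h2 := (List.pairwise_cons.1 hp).2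
  exact ⟨h2.sublist (List.dropWhile_sublist _), not_mem_dropWhile_of_sorted x xs h1 h2⟩

lemma count_run (x : Int) (xs : List Int) (hp : (x :: xs).Pairwise (· ≤ ·)) :
    (x :: xs).count x = 1 + (xs.takeWhile (fun y => y == x)).length := by
  have hnd := (sorted_tail_facts x xs hp).2
  have hsplit := List.takeWhile_append_dropWhile (p := fun y => y == x) (l := xs)
  have ht : (xs.takeWhile (fun y => y == x)).count x = (xs.takeWhile (fun y => y == x)).length := by
    apply List.count_eq_length.2
    intro b hb
    have := List.mem_takeWhile_imp hb
    simp at this; omega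
  have hd : (xs.dropWhile (fun y => y == x)).count x = 0 := List.count_eq_zero.2 hnd
  have hc : xs.count x = (xs.takeWhile (fun y => y == x)).length := by
    conv_lhs => rw [← hsplit]
    rw [List.count_append, ht, hd]
    omega
  rw [List.count_cons_self, hc]
  omega

lemma count_later (x v : Int) (xs : List Int) (hvx : v ≠ x) :
    (x :: xs).count v = (xs.takeWhile (fun y => y == x) ++ xs.dropWhile (fun y => y == x)).count v := by
  rw [List.takeWhile_append_dropWhile]
  simp only [List.count_cons]
  have : ¬ (x = v) := fun e => hvx e.symm
  simp [this]

lemma runs_snd_count : ∀ s : List Int, s.Pairwise (· ≤ ·) →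
    ∀ p ∈ runs s, p.2 = (s.count p.1 : Int) := by
  intro s
  induction s using runs.induct with
  | case1 => simp [runs]
  | case2 x xs ih =>
    intro hp p hmem
    rw [runs] at hmem
    rcases List.mem_cons.1 hmem with rfl | hmem'
    · simp only
      rw [count_run x xs hp]
      push_cast; ring
    · have hfacts := sorted_tail_facts x xs hp
      have hv : p.1 ∈ xs.dropWhile (fun y => y == x) :=
        (runs_fst_mem _ p.1).1 (List.mem_map_of_mem hmem')
      have hvx : p.1 ≠ x := fun e => hfacts.2 (e ▸ hv)
      rw [ih hfacts.1 p hmem']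
      have hct : (xs.takeWhile (fun y => y == x)).count p.1 = 0 := by
        apply List.count_eq_zero.2
        intro hc
        exact hvx (by simpa using List.mem_takeWhile_imp hc)
      rw [count_later x p.1 xs hvx, List.count_append, hct]
      norm_num

lemma runs_fst_nodup : ∀ s : List Int, s.Pairwise (· ≤ ·) → ((runs s).map Prod.fst).Nodup := by
  intro s
  induction s using runs.induct with
  | case1 => simp [runs]
  | case2 x xs ih =>
    intro hp
    have hfacts := sorted_tail_facts x xs hp
    rw [runs]
    simp only [List.map_cons]
    refine List.nodup_cons.2 ⟨?_, ih hfacts.1⟩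
    intro hx
    exact hfacts.2 ((runs_fst_mem _ x).1 hx)

-- B's loop, rewritten as the sum of the per-distinct-value contribution over the run heads
lemma solution_alt_eq_sum (A : List Int) :
    solution_alt A =
      (((runs (PySem.List.sorted A (fun x => x) false)).map Prod.fst).map
        (fun v => min (((PySem.List.sorted A (fun x => x) false).count v : Int))
          |(((PySem.List.sorted A (fun x => x) false).count v : Int)) - v|)).sum := by
  unfold solution_alt
  simp only
  rw [PySem.List.foldl_add (g := fun p : Int × Int => min p.2 |p.2 - p.1|), zero_add, List.map_map]
  apply congrArg
  apply List.map_congr_left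
  intro p hp
  have hpair : (PySem.List.sorted A (fun x => x) false).Pairwise (· ≤ ·) :=
    PySem.List.sorted_pairwise A (fun x => x)
  have h := runs_snd_count _ hpair p hp
  simp only [Function.comp_apply, h]

-- A's two loops, rewritten as the same sum over the distinct elements of A
lemma solution_eq_sum (A : List Int) :
    solution A =
      ((PySem.Set.ofList A).map
        (fun v => min ((A.count v : Int)) |((A.count v : Int)) - v|)).sum := by
  unfold solution
  simp only
  have hstep : ∀ (d : PySem.Dict Int Int) (n : Int),
      (if d.contains n then d.insert n (d.getD n 0 + 1) else d.insert n 1)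
        = d.insert n (d.getD n 0 + 1) := by
    intro d n
    by_cases h : d.contains n = true
    · simp [h]
    · have h0 : d.getD n 0 = 0 :=
        PySem.Dict.getD_of_not_contains d 0 (by simpa using h)
      simp [h, h0]
  have hmap : A.foldl (fun d number =>
      if d.contains number then d.insert number (d.getD number 0 + 1)
      else d.insert number 1) PySem.Dict.empty = PySem.Dict.counter A := by
    exact Eq.trans
      (PySem.List.foldl_congr_mem A _
        (fun (d : PySem.Dict Int Int) (n : Int) => d.insert n (d.getD n 0 + 1))
        PySem.Dict.empty (fun acc x _ => hstep acc x))
      (PySem.Dict.foldl_insert_getD_add_one_eq_counter A)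
  rw [hmap, PySem.Dict.keys_counter]
  rw [PySem.List.foldl_add (g := fun k => min ((PySem.Dict.counter A).getD k 0 - 0)
    |((PySem.Dict.counter A).getD k 0) - k|), zero_add]
  apply congrArg
  apply List.map_congr_left
  intro k _
  simp [PySem.Dict.getD_counter]

theorem solution_spec_aux (A : List Int) : solution A = solution_alt A := by
  rw [solution_eq_sum, solution_alt_eq_sum]
  have hperm : (PySem.List.sorted A (fun x => x) false).Perm A :=
    PySem.List.sorted_perm A (fun x => x) false
  have hpair : (PySem.List.sorted A (fun x => x) false).Pairwise (· ≤ ·) :=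
    PySem.List.sorted_pairwise A (fun x => x)
  have h1 : ((runs (PySem.List.sorted A (fun x => x) false)).map Prod.fst).map
        (fun v => min (((PySem.List.sorted A (fun x => x) false).count v : Int))
          |(((PySem.List.sorted A (fun x => x) false).count v : Int)) - v|)
      = ((runs (PySem.List.sorted A (fun x => x) false)).map Prod.fst).map
        (fun v => min ((A.count v : Int)) |((A.count v : Int)) - v|) := by
    apply List.map_congr_left
    intro v _
    rw [hperm.count_eq v]
  rw [h1]
  have hkeys : (PySem.Set.ofList A).Perm
      ((runs (PySem.List.sorted A (fun x => x) false)).map Prod.fst) := by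
    apply (List.perm_ext_iff_of_nodup (PySem.Set.nodup_ofList A) (runs_fst_nodup _ hpair)).2
    intro v
    rw [PySem.Set.mem_ofList, runs_fst_mem]
    exact hperm.mem_iff.symm
  exact (hkeys.map _).sum_eq

-- ===== VERDICT (by name: the statement is the Claim_ definition above) =====
theorem solution_spec : Claim_equal_solution := by
  intro A _
  unfold Spec_solution
  exact solution_spec_aux A
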